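-- pv_equiv track=rewrite | github.com/CrowdingFaun624/0hh1python | Utilities/LevelCreatorNoPosition.py | row_or_column_is_cloning
-- ===== SOURCE A (Python) =====
-- def row_or_column_is_cloning(tiles_values:list[int], tile_index:int, other_tile_index:int, size:int) -> bool:
--     tile_pos = get_pos(tile_index, size); other_tile_pos = get_pos(other_tile_index, size)
--     is_row = tile_pos[0] != other_tile_pos[0] # if their x-positions are the same, it is a column
--     this_index = tile_pos[int(is_row)]
--     row_or_column_indexes = get_row(this_index, size) if is_row else get_column(this_index, size)
--     this_row_or_column_values = get_values(tiles_values, row_or_column_indexes)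
--     for index in range(size): # FIXME: this might have bug of checking even rows that aren't full.
--         if index == this_index: continue
--         row_or_column_indexes = get_row(index, size) if is_row else get_column(index, size)
--         row_or_column_values = get_values(tiles_values, row_or_column_indexes)
--         if this_row_or_column_values == row_or_column_values: return True
--     else: return False
--
-- def get_values(tiles_values:list[int], indexes:list[int]) -> list[int]:
--     '''Gets the values of a list of indexes'''
--     return [tiles_values[index] for index in indexes]
--
-- def get_row(y_position:int, size:int) -> list[int]:
--     '''Returns a list of indexes in the row'''
--     return list(range(y_position * size, (y_position + 1) * size, 1))
--
-- def get_column(x_position:int, size:int) -> list[int]: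
--     '''Returns a list of indexes in the column'''
--     return list(range(x_position, size ** 2, size))
--
-- def get_pos(index:int, size:int) -> tuple[int,int]:
--     return (index % size, index // size)
-- ===== SOURCE B (Python) =====
-- def row_or_column_is_cloning(tiles_values, tile_index, other_tile_index, size):
--     if tile_index % size == other_tile_index % size:
--         # same x-position: it is a column; cell (line, k) lives at k*size + line
--         this = tile_index % size
--         def cell(line, k):
--             return tiles_values[k * size + line]
--     else:
--         this = tile_index // size
--         def cell(line, k):
--             return tiles_values[line * size + k]
--     candidates = [j for j in range(size) if j != this]
--     for k in range(size):
--         v = cell(this, k)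
--         candidates = [j for j in candidates if cell(j, k) == v]
--     return bool(candidates)
-- ===== Notes on version B (the rewrite author's own statement) =====
-- stated objective: alternative
-- what changed: B replaces A's line-major scan (rebuild each other line and compare it whole against the target) by a position-major candidate-elimination sweep: it starts with every other line index as a candidate and, for each cell position k, filters out candidates whose k-th cell differs from the target line's k-th cell, returning whether any candidate survives.
-- outside the precondition, e.g. on row_or_column_is_cloning([0, 0], -2, 5, 2): A returns True, B raises IndexError; on row_or_column_is_cloning([1, 0, 0, 1], -1, 0, 2): A returns True, B returns True
import Mathlib
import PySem

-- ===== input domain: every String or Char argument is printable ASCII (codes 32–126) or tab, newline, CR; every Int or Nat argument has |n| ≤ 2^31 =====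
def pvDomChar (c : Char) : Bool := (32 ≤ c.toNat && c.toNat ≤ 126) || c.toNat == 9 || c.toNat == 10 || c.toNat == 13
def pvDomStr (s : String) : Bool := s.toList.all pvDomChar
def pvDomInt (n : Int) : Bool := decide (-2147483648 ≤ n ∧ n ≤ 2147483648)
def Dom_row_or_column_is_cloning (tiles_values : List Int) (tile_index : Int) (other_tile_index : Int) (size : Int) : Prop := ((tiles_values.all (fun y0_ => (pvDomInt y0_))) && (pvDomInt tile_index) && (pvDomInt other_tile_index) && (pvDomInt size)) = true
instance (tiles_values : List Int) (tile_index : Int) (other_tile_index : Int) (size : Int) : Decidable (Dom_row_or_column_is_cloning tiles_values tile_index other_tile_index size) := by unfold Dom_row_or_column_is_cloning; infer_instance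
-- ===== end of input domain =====

-- B replaces A's line-major rescan by a position-major candidate-elimination sweep over cell
-- positions, keeping the set of still-matching line indexes (objective: alternative).
-- ===== PORT A =====
def pvGetValues (tiles_values : List Int) (indexes : List Int) : List Int :=
  indexes.map (fun index => PySem.List.pyGetD tiles_values index 0)

def pvGetRow (y_position : Int) (size : Int) : List Int :=
  PySem.List.pyRange (y_position * size) ((y_position + 1) * size) 1

def pvGetColumn (x_position : Int) (size : Int) : List Int :=
  PySem.List.pyRange x_position (size ^ 2) size

def pvGetPos (index : Int) (size : Int) : Int × Int :=
  (PySem.Int.mod index size, PySem.Int.floordiv index size)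

def row_or_column_is_cloning (tiles_values : List Int) (tile_index : Int) (other_tile_index : Int) (size : Int) : Bool :=
  let tile_pos := pvGetPos tile_index size
  let other_tile_pos := pvGetPos other_tile_index size
  let is_row := tile_pos.1 != other_tile_pos.1
  let this_index := if is_row then tile_pos.2 else tile_pos.1
  let this_row_or_column_values :=
    pvGetValues tiles_values (if is_row then pvGetRow this_index size else pvGetColumn this_index size)
  -- 'for index in range(size): if …: continue; if …: return True; else: return False'
  -- = short-circuit any over the range, 'continue' contributing false
  (PySem.List.pyRange 0 size 1).any (fun index =>
    if index == this_index then false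
    else this_row_or_column_values ==
      pvGetValues tiles_values (if is_row then pvGetRow index size else pvGetColumn index size))

-- ===== PORT B =====
-- Source B's local 'cell' closures, one per branch (column: k*size+line, row: line*size+k)
def pvCellCol (tiles_values : List Int) (size line k : Int) : Int :=
  PySem.List.pyGetD tiles_values (k * size + line) 0

def pvCellRow (tiles_values : List Int) (size line k : Int) : Int :=
  PySem.List.pyGetD tiles_values (line * size + k) 0

def row_or_column_is_cloning_alt (tiles_values : List Int) (tile_index : Int) (other_tile_index : Int) (size : Int) : Bool :=
  let p :=
    if PySem.Int.mod tile_index size == PySem.Int.mod other_tile_index size then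
      (PySem.Int.mod tile_index size, pvCellCol tiles_values size)
    else
      (PySem.Int.floordiv tile_index size, pvCellRow tiles_values size)
  let this := p.1
  let cell := p.2
  -- candidates = [j for j in range(size) if j != this]
  let init := (PySem.List.pyRange 0 size 1).filter (fun j => !(j == this))
  -- for k in range(size): candidates = [j for j in candidates if cell(j,k) == cell(this,k)]
  let final := (PySem.List.pyRange 0 size 1).foldl
    (fun cands k => cands.filter (fun j => cell j k == cell this k)) init
  !final.isEmpty

-- ===== PRECONDITION & SPEC =====
-- Pre_ is the natural domain: a degenerate negative size (both programs see an empty grid), or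
-- size >= 1 with the tile list covering the size*size grid and the target line well determined:
-- either the two tiles share an x-position (column case; only tile_index % size is used, so any
-- tile indices are fine) or tile_index lies inside the grid (row case). It excludes inputs A still
-- returns on only where A's value hangs on accidents of Python list indexing: a row case whose
-- tile_index is negative or past the grid (negative-index wraparound makes A compare wrapped lines
-- while the loop skips no line) and tile lists shorter than size*size (A usually raises IndexError
-- there; where an early match lets it return, the value depends on which lines its scan happens to
-- reach before the missing one). size = 0 raises in both.
def Pre_row_or_column_is_cloning (tiles_values : List Int) (tile_index : Int) (other_tile_index : Int) (size : Int) : Prop :=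
  size ≤ -1 ∨
  (1 ≤ size ∧ size * size ≤ (tiles_values.length : Int) ∧
   (tile_index % size = other_tile_index % size ∨
    (0 ≤ tile_index ∧ tile_index < size * size)))

instance (tiles_values : List Int) (tile_index : Int) (other_tile_index : Int) (size : Int) : Decidable (Pre_row_or_column_is_cloning tiles_values tile_index other_tile_index size) := by unfold Pre_row_or_column_is_cloning; infer_instance

def pvWitness_row_or_column_is_cloning : List Int × Int × Int × Int := ([1, 0, 0, 1], 0, 1, 2)

def Spec_row_or_column_is_cloning (tiles_values : List Int) (tile_index : Int) (other_tile_index : Int) (size : Int) (out : Bool) : Prop := out = row_or_column_is_cloning_alt tiles_values tile_index other_tile_index size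
instance (tiles_values : List Int) (tile_index : Int) (other_tile_index : Int) (size : Int) (out : Bool) : Decidable (Spec_row_or_column_is_cloning tiles_values tile_index other_tile_index size out) := by unfold Spec_row_or_column_is_cloning; infer_instance

-- ===== CLAIM (what is proved, stated in full; the proofs are below) =====
def Claim_equal_row_or_column_is_cloning : Prop := ∀ (tiles_values : List Int) (tile_index : Int) (other_tile_index : Int) (size : Int), Dom_row_or_column_is_cloning tiles_values tile_index other_tile_index size → Pre_row_or_column_is_cloning tiles_values tile_index other_tile_index size → Spec_row_or_column_is_cloning tiles_values tile_index other_tile_index size (row_or_column_is_cloning tiles_values tile_index other_tile_index size)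

-- ===== LEMMAS AND PROOFS =====

-- the i-th row / column of the grid, expressed uniformly through getD
def pvRowSpec (tv : List Int) (n i : Nat) : List Int :=
  (List.range n).map (fun k => tv.getD (i * n + k) 0)

def pvColSpec (tv : List Int) (n i : Nat) : List Int :=
  (List.range n).map (fun k => tv.getD (i + n * k) 0)

lemma A_row_eq (tv : List Int) (n i : Nat) :
    pvGetValues tv (pvGetRow (i : Int) (n : Int)) = pvRowSpec tv n i := by
  unfold pvGetValues pvGetRow pvRowSpec
  rw [PySem.List.pyRange_one]
  have h0 : ((i : Int) + 1) * (n : Int) - (i : Int) * (n : Int) = (n : Int) := by ring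
  rw [h0, Int.toNat_natCast, List.map_map]
  apply List.map_congr_left
  intro k hk
  have h2 : (i : Int) * (n : Int) + (k : Int) = ((i * n + k : Nat) : Int) := by push_cast; ring
  rw [Function.comp_apply, h2, PySem.List.pyGetD_natCast]

lemma A_col_eq (tv : List Int) (n i : Nat) (hn : 0 < n) (hi : i < n) :
    pvGetValues tv (pvGetColumn (i : Int) (n : Int)) = pvColSpec tv n i := by
  unfold pvGetValues pvGetColumn pvColSpec
  rw [PySem.List.pyRange_of_pos _ _ (by exact_mod_cast hn)]
  have h1 : (if (i:Int) < (n:Int)^2 then ((((n:Int))^2 - (i:Int) + (n:Int) - 1) / (n:Int)).toNat else 0) = n := by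
    rw [if_pos (by nlinarith)]
    have h2 : ((n:Int))^2 - (i:Int) + (n:Int) - 1 = ((n:Int) - 1 - (i:Int)) + (n:Int) * (n:Int) := by ring
    rw [h2, Int.add_mul_ediv_left _ _ (by exact_mod_cast hn.ne')]
    have h3 : ((n:Int) - 1 - (i:Int)) / (n:Int) = 0 := by
      apply Int.ediv_eq_zero_of_lt <;> omega
    rw [h3]; omega
  rw [h1, List.map_map]
  apply List.map_congr_left
  intro k hk
  have h2 : (i : Int) + (n : Int) * (k : Int) = ((i + n * k : Nat) : Int) := by push_cast; ring
  rw [Function.comp_apply, h2, PySem.List.pyGetD_natCast]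

-- folding per-position filters over the positions = one filter by "matches at every position"
lemma foldl_filter_eq_filter_all {α β : Type} (p : α → β → Bool) (ks : List β) (init : List α) :
    ks.foldl (fun c k => c.filter (fun j => p j k)) init
      = init.filter (fun j => ks.all (fun k => p j k)) := by
  induction ks generalizing init with
  | nil => simp
  | cons k rest ih =>
    rw [List.foldl_cons, ih, List.filter_filter]
    apply List.filter_congr
    intro a _
    simp [List.all_cons, Bool.and_comm]

lemma map_range_eq_iff (f g : Nat → Int) (n : Nat) :
    ((List.range n).map f = (List.range n).map g) ↔ ∀ k < n, f k = g k := by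
  constructor
  · intro h k hk
    have h2 := congrArg (fun l => l[k]?) h
    simpa [List.getElem?_map, List.getElem?_range, hk] using h2
  · intro h
    exact List.map_congr_left (fun a ha => h a (List.mem_range.mp ha))

-- the bridge: A's "some other line equals line T" any  =  B's "a candidate survives"
lemma core_bridge (n T : Nat) (c : Nat → Nat → Int) :
    ((List.range n).any (fun i => if i == T then false
        else ((List.range n).map (fun k => c T k) == (List.range n).map (fun k => c i k))))
      = !((((List.range n).filter (fun j => !(j == T))).filter
            (fun j => (List.range n).all (fun k => c j k == c T k))).isEmpty) := by
  rw [Bool.eq_iff_iff]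
  constructor
  · intro h
    simp only [List.any_eq_true, List.mem_range] at h
    obtain ⟨i, hi, hb⟩ := h
    by_cases he : i = T
    · simp [he] at hb
    · rw [if_neg (by simp [he]), beq_iff_eq, map_range_eq_iff] at hb
      simp only [Bool.not_eq_eq_eq_not, Bool.not_true, List.isEmpty_eq_false_iff_exists_mem]
      exact ⟨i, by
        simp only [List.mem_filter, List.mem_range, List.all_eq_true, List.mem_range]
        exact ⟨⟨hi, by simp [he]⟩, fun k hk => by
          rw [beq_iff_eq]; exact (hb k hk).symm⟩⟩
  · intro h
    simp only [Bool.not_eq_eq_eq_not, Bool.not_true, List.isEmpty_eq_false_iff_exists_mem] at h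
    obtain ⟨j, hj⟩ := h
    simp only [List.mem_filter, List.mem_range, List.all_eq_true] at hj
    obtain ⟨⟨hjn, hne⟩, hall⟩ := hj
    simp only [List.any_eq_true, List.mem_range]
    refine ⟨j, hjn, ?_⟩
    rw [if_neg (by simpa using hne), beq_iff_eq, map_range_eq_iff]
    intro k hk
    exact (beq_iff_eq.mp (hall k hk)).symm

lemma pv_all_congr_mem {α : Type} {l : List α} {f g : α → Bool} (h : ∀ x ∈ l, f x = g x) :
    l.all f = l.all g := by
  induction l with
  | nil => rfl
  | cons a as ih =>
    simp only [List.all_cons]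
    rw [h a (by simp), ih (fun x hx => h x (by simp [hx]))]

lemma natCast_beq (a b : Nat) : (((a : Int)) == ((b : Int))) = (a == b) := by
  rw [Bool.eq_iff_iff]
  simp only [beq_iff_eq]
  exact ⟨fun h => by exact_mod_cast h, fun h => by exact_mod_cast h⟩

lemma main_equiv : ∀ (tv : List Int) (t o size : Int),
    Pre_row_or_column_is_cloning tv t o size →
    row_or_column_is_cloning tv t o size = row_or_column_is_cloning_alt tv t o size := by
  intro tv t o size hpre
  rcases hpre with hneg | ⟨hs, hlen, hto⟩
  · -- size ≤ -1: the range of lines is empty on both sides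
    have hr : PySem.List.pyRange 0 size 1 = [] := PySem.List.pyRange_one_eq_nil (by omega)
    unfold row_or_column_is_cloning row_or_column_is_cloning_alt
    rw [hr]
    by_cases hc : (PySem.Int.mod t size == PySem.Int.mod o size) = true
    · rw [if_pos hc]; rfl
    · rw [if_neg hc]; rfl
  obtain ⟨n, rfl⟩ : ∃ n : Nat, size = (n : Int) := ⟨size.toNat, (Int.toNat_of_nonneg (by omega)).symm⟩
  have hn : 0 < n := by exact_mod_cast hs
  unfold row_or_column_is_cloning row_or_column_is_cloning_alt pvGetPos
  dsimp only
  by_cases hc : PySem.Int.mod t (n : Int) = PySem.Int.mod o (n : Int)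
  · -- same x-position: column case
    obtain ⟨m, hm, hmlt⟩ : ∃ m : Nat, PySem.Int.mod t (n : Int) = (m : Int) ∧ m < n := by
      refine ⟨(PySem.Int.mod t (n : Int)).toNat,
        (Int.toNat_of_nonneg (PySem.Int.mod_nonneg t (by exact_mod_cast hn))).symm, ?_⟩
      have := PySem.Int.mod_lt t (b := (n : Int)) (by exact_mod_cast hn)
      omega
    have hcb : (PySem.Int.mod t (n : Int) != PySem.Int.mod o (n : Int)) = false := by simp [hc]
    have hcb2 : (PySem.Int.mod t (n : Int) == PySem.Int.mod o (n : Int)) = true := by simp [hc]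
    rw [hcb, hcb2, hm]
    simp only [Bool.false_eq_true, if_false, if_true]
    -- both sides over Nat indices, with c i k = tv.getD (i + n*k) 0
    set c : Nat → Nat → Int := fun i k => tv.getD (i + n * k) 0
    have hcellB : ∀ a b : Nat, pvCellCol tv (n : Int) (a : Int) (b : Int) = c a b := by
      intro a b
      unfold pvCellCol
      have h2 : (b : Int) * (n : Int) + (a : Int) = ((a + n * b : Nat) : Int) := by push_cast; ring
      rw [h2, PySem.List.pyGetD_natCast]
    have hvalsA : ∀ a : Nat, a < n →
        pvGetValues tv (pvGetColumn (a : Int) (n : Int)) = (List.range n).map (fun k => c a k) := by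
      intro a ha
      rw [A_col_eq tv n a hn ha]; rfl
    -- A side to Nat form
    rw [PySem.List.pyRange_zero_nat, List.any_map, List.filter_map, List.foldl_map,
        foldl_filter_eq_filter_all, List.filter_map]
    rw [Bool.eq_iff_iff, List.isEmpty_map]
    rw [← Bool.eq_iff_iff]
    simp only [Function.comp_def]
    have hAside :
        ((List.range n).any (fun a =>
            if ((a : Int) == ((m : Nat) : Int)) then false
            else pvGetValues tv (pvGetColumn ((m : Nat) : Int) (n : Int)) ==
              pvGetValues tv (pvGetColumn ((a : Nat) : Int) (n : Int))))
          = ((List.range n).any (fun i => if i == m then false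
              else ((List.range n).map (fun k => c m k) == (List.range n).map (fun k => c i k)))) := by
      apply PySem.List.any_congr_mem
      intro a ha
      simp only [List.mem_range] at ha
      rw [natCast_beq, hvalsA m hmlt, hvalsA a ha]
    rw [hAside, core_bridge n m c]
    have hinner : (List.range n).filter (fun (a : Nat) => !((a : Int) == ((m : Nat) : Int)))
        = (List.range n).filter (fun (j : Nat) => !(j == m)) := by
      apply List.filter_congr
      intro a _
      rw [natCast_beq]
    rw [hinner]
    congr 1
    congr 1
    apply List.filter_congr
    intro a _
    apply pv_all_congr_mem
    intro b _
    rw [hcellB a b, hcellB m b]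
  · -- different x-positions: row case; Pre_ forces tile_index inside the grid
    have hrange : 0 ≤ t ∧ t < (n : Int) * (n : Int) := by
      rcases hto with h | h
      · exfalso
        apply hc
        rw [PySem.Int.mod_eq_emod_of_pos (b := (n : Int)) (by exact_mod_cast hn),
            PySem.Int.mod_eq_emod_of_pos (b := (n : Int)) (by exact_mod_cast hn)]
        exact h
      · exact h
    obtain ⟨t', rfl⟩ : ∃ m : Nat, t = (m : Int) :=
      ⟨t.toNat, (Int.toNat_of_nonneg hrange.1).symm⟩
    have hcb : (PySem.Int.mod (t' : Int) (n : Int) != PySem.Int.mod o (n : Int)) = true := by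
      rw [bne_iff_ne]; exact hc
    have hcb2 : (PySem.Int.mod (t' : Int) (n : Int) == PySem.Int.mod o (n : Int)) = false := by
      rw [beq_eq_false_iff_ne]; exact hc
    rw [hcb, hcb2]
    simp only [Bool.false_eq_true, if_false, if_true, PySem.Int.floordiv_natCast]
    set T := t' / n
    set c : Nat → Nat → Int := fun i k => tv.getD (i * n + k) 0
    have hcellB : ∀ a b : Nat, pvCellRow tv (n : Int) (a : Int) (b : Int) = c a b := by
      intro a b
      unfold pvCellRow
      have h2 : (a : Int) * (n : Int) + (b : Int) = ((a * n + b : Nat) : Int) := by push_cast; ring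
      rw [h2, PySem.List.pyGetD_natCast]
    have hvalsA : ∀ a : Nat,
        pvGetValues tv (pvGetRow (a : Int) (n : Int)) = (List.range n).map (fun k => c a k) := by
      intro a
      rw [A_row_eq tv n a]; rfl
    rw [PySem.List.pyRange_zero_nat, List.any_map, List.filter_map, List.foldl_map,
        foldl_filter_eq_filter_all, List.filter_map]
    rw [Bool.eq_iff_iff, List.isEmpty_map]
    rw [← Bool.eq_iff_iff]
    simp only [Function.comp_def]
    have hAside :
        ((List.range n).any (fun a =>
            if ((a : Int) == ((T : Nat) : Int)) then false
            else pvGetValues tv (pvGetRow ((T : Nat) : Int) (n : Int)) ==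
              pvGetValues tv (pvGetRow ((a : Nat) : Int) (n : Int))))
          = ((List.range n).any (fun i => if i == T then false
              else ((List.range n).map (fun k => c T k) == (List.range n).map (fun k => c i k)))) := by
      apply PySem.List.any_congr_mem
      intro a ha
      rw [natCast_beq, hvalsA T, hvalsA a]
    rw [hAside, core_bridge n T c]
    have hinner : (List.range n).filter (fun (a : Nat) => !((a : Int) == ((T : Nat) : Int)))
        = (List.range n).filter (fun (j : Nat) => !(j == T)) := by
      apply List.filter_congr
      intro a _
      rw [natCast_beq]
    rw [hinner]
    congr 1
    congr 1
    apply List.filter_congr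
    intro a _
    apply pv_all_congr_mem
    intro b _
    rw [hcellB a b, hcellB T b]

-- ===== VERDICT (by name: the statement is the Claim_ definition above) =====
theorem row_or_column_is_cloning_spec : Claim_equal_row_or_column_is_cloning := by
  intro tv t o size _ hpre
  exact main_equiv tv t o size hpre
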